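-- pv_equiv track=rewrite | github.com/lidorhuri/EigerX | ans4/ans4.py | count_max_elements
-- ===== SOURCE A (Python) =====
-- def count_max_elements(numSeq, maxElement, maxCount):
--     if len(numSeq)>0:
--         currElement = numSeq.pop(0)
--         if currElement>maxElement:
--             maxElement = currElement
--             maxCount=1
--         elif currElement==maxElement:
--             maxCount+=1
--         if currElement != 0:
--             return count_max_elements(numSeq, maxElement, maxCount)
--         else:
--             return (maxElement,maxCount)
--     else:
--         return (maxElement,maxCount)
-- ===== SOURCE B (Python) =====
-- def count_max_elements(numSeq, maxElement, maxCount):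
--     # Closed-form pass: cut the list at the first zero (inclusive), then the
--     # answer is the max of that prefix (and the seed) and how often it occurs.
--     # numSeq is drained up to and including the first zero, as in A.
--     try:
--         cut = numSeq.index(0) + 1
--     except ValueError:
--         cut = len(numSeq)
--     prefix = numSeq[:cut]
--     del numSeq[:cut]
--     m = max([maxElement] + prefix)
--     c = prefix.count(m)
--     if m == maxElement:
--         c += maxCount
--     return (m, c)
-- ===== Notes on version B (the rewrite author's own statement) =====
-- stated objective: alternative
-- what changed: Replaces A's recursive running-max/count state machine by a closed-form computation: find the first zero, take the prefix up to and including it, and compute max and count of that prefix directly.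
import Mathlib
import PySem

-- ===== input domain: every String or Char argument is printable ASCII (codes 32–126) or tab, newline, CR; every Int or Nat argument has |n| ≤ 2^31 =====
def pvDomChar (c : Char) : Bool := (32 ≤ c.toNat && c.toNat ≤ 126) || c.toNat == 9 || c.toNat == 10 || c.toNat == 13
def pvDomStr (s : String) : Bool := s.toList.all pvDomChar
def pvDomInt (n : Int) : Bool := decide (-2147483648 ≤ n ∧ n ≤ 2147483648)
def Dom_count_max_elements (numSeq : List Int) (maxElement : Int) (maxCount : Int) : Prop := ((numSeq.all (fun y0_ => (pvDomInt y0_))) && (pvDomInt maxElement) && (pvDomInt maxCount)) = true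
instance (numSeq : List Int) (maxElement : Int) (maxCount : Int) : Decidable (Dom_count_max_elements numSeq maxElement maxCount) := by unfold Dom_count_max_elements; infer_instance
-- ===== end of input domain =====

-- B computes the same return value by a closed form over the pfx up to the first zero
-- (objective: alternative decomposition). Both A and B drain numSeq up to and including the
-- first zero in Python; the equivalence proved here is about the return value.

-- ===== PORT A =====
-- literal transliteration of A's recursion (pop(0), update state, recurse unless zero)
def count_max_elements (numSeq : List Int) (maxElement : Int) (maxCount : Int) : Int × Int :=
  match numSeq with
  | [] => (maxElement, maxCount)
  | currElement :: rest =>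
    let st : Int × Int :=
      if currElement > maxElement then (currElement, 1)
      else if currElement == maxElement then (maxElement, maxCount + 1)
      else (maxElement, maxCount)
    if currElement != 0 then count_max_elements rest st.1 st.2
    else (st.1, st.2)

-- ===== PORT B =====
-- Source B: cut = index of first 0 (+1) else len; pfx = numSeq[:cut];
-- m = max([maxElement]+pfx)  (ported as the foldl running max, = Python's max);
-- c = pfx.count(m), plus maxCount if m == maxElement.
def count_max_elements_alt (numSeq : List Int) (maxElement : Int) (maxCount : Int) : Int × Int :=
  let cut : Nat :=
    match PySem.List.index? numSeq 0 with
    | some i => i + 1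
    | none => numSeq.length
  let pfx := numSeq.take cut     -- numSeq[:cut], 0 ≤ cut ≤ len so take is exact
  let m := pfx.foldl max maxElement
  let c := PySem.List.count pfx m
  (m, if m == maxElement then c + maxCount else c)

-- ===== PRECONDITION & SPEC =====
def Spec_count_max_elements (numSeq : List Int) (maxElement : Int) (maxCount : Int) (out : Int × Int) : Prop := out = count_max_elements_alt numSeq maxElement maxCount
instance (numSeq : List Int) (maxElement : Int) (maxCount : Int) (out : Int × Int) : Decidable (Spec_count_max_elements numSeq maxElement maxCount out) := by unfold Spec_count_max_elements; infer_instance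

-- ===== CLAIM (what is proved, stated in full; the proofs are below) =====
def Claim_equal_count_max_elements : Prop := ∀ (numSeq : List Int) (maxElement : Int) (maxCount : Int), Dom_count_max_elements numSeq maxElement maxCount → Spec_count_max_elements numSeq maxElement maxCount (count_max_elements numSeq maxElement maxCount)

-- ===== LEMMAS AND PROOFS =====

theorem alt_nil (m c : Int) : count_max_elements_alt [] m c = (m, c) := by
  simp [count_max_elements_alt, PySem.List.count]

-- B on a list starting with a nonzero element = B on the tail with A's updated state
theorem alt_cons_ne (x : Int) (l : List Int) (m c : Int) (hx : x ≠ 0) :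
    count_max_elements_alt (x :: l) m c =
      count_max_elements_alt l (max m x)
        (if x > m then 1 else if x = m then c + 1 else c) := by
  have hidx := PySem.List.index?_cons_of_ne l hx
  unfold count_max_elements_alt
  rw [hidx]
  cases hI : PySem.List.index? l 0 with
  | none =>
    simp only [Option.map_none, List.length_cons, List.take_succ_cons,
      List.take_length, List.foldl_cons]
    have hle := (PySem.List.le_foldl_max l (max m x)).1
    simp only [PySem.List.count, List.count_cons, beq_iff_eq]
    rcases lt_trichotomy m x with h | h | h
    · rw [max_eq_right h.le] at hle ⊢
      split_ifs <;> simp only [Prod.mk.injEq] <;> (constructor <;> push_cast <;> omega)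
    · subst h
      rw [max_self] at hle ⊢
      split_ifs <;> simp only [Prod.mk.injEq] <;> (constructor <;> push_cast <;> omega)
    · rw [max_eq_left h.le] at hle ⊢
      split_ifs <;> simp only [Prod.mk.injEq] <;> (constructor <;> push_cast <;> omega)
  | some i =>
    simp only [Option.map_some, List.take_succ_cons, List.foldl_cons]
    have hle := (PySem.List.le_foldl_max (l.take (i + 1)) (max m x)).1
    simp only [PySem.List.count, List.count_cons, beq_iff_eq]
    rcases lt_trichotomy m x with h | h | h
    · rw [max_eq_right h.le] at hle ⊢
      split_ifs <;> simp only [Prod.mk.injEq] <;> (constructor <;> push_cast <;> omega)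
    · subst h
      rw [max_self] at hle ⊢
      split_ifs <;> simp only [Prod.mk.injEq] <;> (constructor <;> push_cast <;> omega)
    · rw [max_eq_left h.le] at hle ⊢
      split_ifs <;> simp only [Prod.mk.injEq] <;> (constructor <;> push_cast <;> omega)

-- B on a list starting with zero returns A's updated state at that zero
theorem alt_cons_zero (l : List Int) (m c : Int) :
    count_max_elements_alt (0 :: l) m c =
      (if (0:Int) > m then ((0:Int), (1:Int)) else if (0:Int) = m then (m, c + 1) else (m, c)) := by
  unfold count_max_elements_alt
  rw [PySem.List.index?_cons_self]
  simp only [List.take_succ_cons, List.take_zero, List.foldl_cons, List.foldl_nil,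
    PySem.List.count, List.count_cons, List.count_nil, beq_iff_eq]
  rcases lt_trichotomy m 0 with h | h | h
  · rw [max_eq_right h.le]
    split_ifs <;> simp only [Prod.mk.injEq] <;> (constructor <;> push_cast <;> omega)
  · subst h
    rw [max_self]
    split_ifs <;> simp only [Prod.mk.injEq] <;> (constructor <;> push_cast <;> omega)
  · rw [max_eq_left h.le]
    split_ifs <;> simp only [Prod.mk.injEq] <;> (constructor <;> push_cast <;> omega)

theorem a_eq_b (numSeq : List Int) (m c : Int) :
    count_max_elements numSeq m c = count_max_elements_alt numSeq m c := by
  induction numSeq generalizing m c with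
  | nil => simp [count_max_elements, alt_nil]
  | cons x l ih =>
    by_cases hx : x = 0
    · subst hx
      rw [alt_cons_zero]
      simp only [count_max_elements, bne_self_eq_false, Bool.false_eq_true,
          if_false, beq_iff_eq] <;>
        (split_ifs <;> simp only [Prod.mk.injEq] <;> (constructor <;> omega))
    · rw [alt_cons_ne x l m c hx]
      have hne : (x != 0) = true := by simp [hx]
      have hst : (if x > m then ((x:Int), (1:Int))
            else if x == m then (m, c + 1) else (m, c)) =
          (max m x, if x > m then 1 else if x = m then c + 1 else c) := by
        simp only [beq_iff_eq]
        rcases lt_trichotomy m x with h | h | h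
        · rw [max_eq_right h.le]
          split_ifs <;> simp only [Prod.mk.injEq] <;> (constructor <;> omega)
        · subst h
          rw [max_self]
          split_ifs <;> simp only [Prod.mk.injEq] <;> (constructor <;> omega)
        · rw [max_eq_left h.le]
          split_ifs <;> simp only [Prod.mk.injEq] <;> (constructor <;> omega)
      simp only [count_max_elements, hst, hne, if_true]
      exact ih _ _

-- ===== VERDICT (by name: the statement is the Claim_ definition above) =====
theorem count_max_elements_spec : Claim_equal_count_max_elements := by
  intro numSeq m c _
  exact a_eq_b numSeq m c
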